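-- pv_equiv track=rewrite | github.com/peteryoda/en_cours_2 | en_cours_2/functions/fun_step_5_ngrams_overlapped_and_not_overlapped.py | keep_ngrams_which_contains_others
-- ===== SOURCE A (Python) =====
-- def keep_ngrams_which_contains_others(x):
--     ngrams_with_overlap = []
--
--     for i in range(len(x)):
--         cpt = 0
--         for j in range(len(x)):
--             if j!=i :
--                 if x[j] in x[i]:
--                     cpt += 1
--         if cpt == len(x) - 1:
--             ngrams_with_overlap.append(x[i])
--
--     return ngrams_with_overlap
-- ===== SOURCE B (Python) =====
-- def keep_ngrams_which_contains_others(x):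
--     # Only a unique longest distinct string can contain all others; check it once.
--     distinct = list(dict.fromkeys(x))
--     m = None
--     for s in distinct:
--         if m is None or len(m) < len(s):
--             m = s
--     if m is None:
--         return []
--     for s in distinct:
--         if len(s) == len(m) and s != m:
--             return []
--     for t in distinct:
--         if t not in m:
--             return []
--     return [s for s in x if s == m]
-- ===== Notes on version B (the rewrite author's own statement) =====
-- stated objective: faster
-- what changed: Instead of checking every element against every other (all-pairs substring tests), B dedups the list, finds the first longest distinct string, verifies it is the unique longest and contains every distinct string, and emits its occurrences in order.
import Mathlib
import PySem

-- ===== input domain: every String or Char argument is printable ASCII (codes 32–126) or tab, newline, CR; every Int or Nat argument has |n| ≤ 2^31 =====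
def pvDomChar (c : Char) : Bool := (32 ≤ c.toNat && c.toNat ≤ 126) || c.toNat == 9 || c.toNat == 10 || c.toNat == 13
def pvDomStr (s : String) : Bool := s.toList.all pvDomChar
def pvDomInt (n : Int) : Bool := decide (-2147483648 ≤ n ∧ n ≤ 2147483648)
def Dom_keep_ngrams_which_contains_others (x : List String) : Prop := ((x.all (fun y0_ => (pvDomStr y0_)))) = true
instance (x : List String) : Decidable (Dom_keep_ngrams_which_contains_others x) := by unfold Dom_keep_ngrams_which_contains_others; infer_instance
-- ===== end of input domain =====

-- B dedups and checks only the unique longest distinct string, instead of A's all-pairs substring scan (asymptotically faster).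

-- ===== PORT A =====
def cptA (x : List String) (i : Int) : Int :=
  (PySem.List.pyRange 0 (PySem.List.len x) 1).foldl (fun cpt j =>
    if j ≠ i then
      (if PySem.Str.isIn (PySem.List.pyGetD x j "") (PySem.List.pyGetD x i "") then cpt + 1 else cpt)
    else cpt) 0

def keep_ngrams_which_contains_others (x : List String) : List String :=
  (PySem.List.pyRange 0 (PySem.List.len x) 1).foldl (fun acc i =>
    let cpt := cptA x i
    if cpt = PySem.List.len x - 1 then acc ++ [PySem.List.pyGetD x i ""] else acc) []

-- ===== PORT B =====
def maxStep (m : Option String) (s : String) : Option String :=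
  match m with
  | none => some s
  | some t => if PySem.Str.len t < PySem.Str.len s then some s else some t

def keep_ngrams_which_contains_others_alt (x : List String) : List String :=
  let distinct := PySem.List.dedup x
  let m? := distinct.foldl maxStep none
  match m? with
  | none => []
  | some m =>
    if distinct.any (fun s => (PySem.Str.len s == PySem.Str.len m) && s != m) then []
    else if distinct.any (fun t => !(PySem.Str.isIn t m)) then []
    else x.filter (fun s => s == m)

-- ===== PRECONDITION & SPEC =====
def Spec_keep_ngrams_which_contains_others (x : List String) (out : List String) : Prop := out = keep_ngrams_which_contains_others_alt x
instance (x : List String) (out : List String) : Decidable (Spec_keep_ngrams_which_contains_others x out) := by unfold Spec_keep_ngrams_which_contains_others; infer_instance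

-- ===== CLAIM (what is proved, stated in full; the proofs are below) =====
def Claim_equal_keep_ngrams_which_contains_others : Prop := ∀ (x : List String), Dom_keep_ngrams_which_contains_others x → Spec_keep_ngrams_which_contains_others x (keep_ngrams_which_contains_others x)

-- ===== LEMMAS AND PROOFS =====
-- an element is kept by A iff every element of x is a substring of it
def goodB (x : List String) (s : String) : Bool := x.all (fun t => PySem.Str.isIn t s)

lemma goodB_iff (x : List String) (s : String) :
    goodB x s = true ↔ ∀ t ∈ x, PySem.Str.isIn t s = true := by
  unfold goodB; exact List.all_eq_true

lemma cptA_eq (x : List String) (i : Nat) :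
    cptA x (i : Int) = ((List.range x.length).countP
      (fun j => decide (j ≠ i) && PySem.Str.isIn (x.getD j "") (x.getD i "")) : Int) := by
  unfold cptA
  rw [PySem.List.pyRange_one]
  have h0 : ((PySem.List.len x : Int) - 0).toNat = x.length := by simp [PySem.List.len_eq]
  rw [h0, List.foldl_map]
  have hfun : (fun (cpt : Int) (k : Nat) => if ((0:Int) + (k:Int)) ≠ (i:Int) then (if PySem.Str.isIn (PySem.List.pyGetD x ((0:Int)+(k:Int)) "") (PySem.List.pyGetD x (i:Int) "") = true then cpt + 1 else cpt) else cpt)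
      = fun (cpt : Int) (k : Nat) => if (decide (k ≠ i) && PySem.Str.isIn (x.getD k "") (x.getD i "")) = true then cpt + 1 else cpt := by
    funext c k
    by_cases h1 : k = i <;>
      by_cases h2 : PySem.Str.isIn (x.getD k "") (x.getD i "") = true <;>
        simp [h1, PySem.List.pyGetD_natCast]
  rw [hfun, PySem.List.foldl_if_add_one]
  simp

lemma cpt_iff (x : List String) (i : Nat) (hi : i < x.length) :
    (cptA x (i : Int) = PySem.List.len x - 1) ↔ ∀ t ∈ x, PySem.Str.isIn t (x.getD i "") = true := by
  have hq := cptA_eq x i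
  set n := x.length with hn
  set q : Nat → Bool := fun j => decide (j ≠ i) && PySem.Str.isIn (x.getD j "") (x.getD i "") with hqdef
  have hcount_ne : (List.range n).countP (fun j => decide (j ≠ i)) = n - 1 := by
    have h1 : (List.range n).countP (fun j => decide (j = i)) = 1 := by
      have := List.count_eq_one_of_mem (List.nodup_range (n := n)) (List.mem_range.mpr hi)
      simpa [List.count_eq_countP] using this
    have h2 := List.length_eq_countP_add_countP (fun j => decide (j = i)) (l := List.range n)
    have h3 : (List.range n).countP (fun j => !decide (j = i)) = (List.range n).countP (fun j => decide (j ≠ i)) := by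
      apply List.countP_congr; intro j _; by_cases h : j = i <;> simp [h]
    simp [List.length_range] at h2
    omega
  constructor
  · intro h
    have hcq : (List.range n).countP q = n - 1 := by
      rw [hq, PySem.List.len_eq] at h
      omega
    have hsub : ((List.range n).filter q).Sublist ((List.range n).filter (fun j => decide (j ≠ i))) := by
      apply List.monotone_filter_right
      intro a ha
      simp [hqdef] at ha
      simp [ha.1]
    have heq : (List.range n).filter q = (List.range n).filter (fun j => decide (j ≠ i)) := by
      apply hsub.eq_of_length
      rw [← List.countP_eq_length_filter, ← List.countP_eq_length_filter]
      omega
    intro t ht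
    obtain ⟨j, hj, rfl⟩ := List.mem_iff_getElem.mp ht
    by_cases hji : j = i
    · subst hji
      rw [← List.getD_eq_getElem x "" hj]
      exact (PySem.Str.isIn_iff_infix _ _).mpr (List.infix_refl _)
    · have hmem : j ∈ (List.range n).filter (fun j => decide (j ≠ i)) := by
        simp [List.mem_filter, List.mem_range, hji]; omega
      rw [← heq, List.mem_filter] at hmem
      have := hmem.2
      simp [hqdef] at this
      rw [← List.getD_eq_getElem x "" hj]
      exact this.2
  · intro h
    have hcq : (List.range n).countP q = (List.range n).countP (fun j => decide (j ≠ i)) := by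
      apply List.countP_congr
      intro j hj
      simp only [List.mem_range] at hj
      by_cases hji : j = i
      · simp [hqdef, hji]
      · have : PySem.Str.isIn (x.getD j "") (x.getD i "") = true := by
          apply h
          rw [List.getD_eq_getElem x "" hj]
          exact List.getElem_mem _
        simp only [hqdef, this, Bool.and_true]
    rw [hq, hcq, hcount_ne, PySem.List.len_eq]
    omega

lemma fmr (p : String → Bool) (xs : List String) :
    (((List.range xs.length).filter (fun j => p (xs.getD j ""))).map (fun j => xs.getD j "")) = xs.filter p := by
  induction xs with
  | nil => simp
  | cons a xs ih =>
    rw [List.length_cons, List.range_succ_eq_map]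
    rw [List.filter_cons]
    by_cases hpa : p ((a :: xs).getD 0 "")
    · simp only [List.getD_cons_zero] at hpa
      rw [if_pos (by simpa using hpa)]
      rw [List.filter_map, List.map_cons, List.map_map]
      have hc1 : ((fun j => p ((a :: xs).getD j "")) ∘ Nat.succ) = fun j => p (xs.getD j "") := by
        funext j; simp
      have hc2 : ((fun j => (a :: xs).getD j "") ∘ Nat.succ) = fun j => xs.getD j "" := by
        funext j; simp
      rw [hc1, hc2, List.getD_cons_zero, List.filter_cons_of_pos (by simpa using hpa), ih]
    · simp only [List.getD_cons_zero] at hpa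
      rw [if_neg (by simpa using hpa)]
      rw [List.filter_map, List.map_map]
      have hc1 : ((fun j => p ((a :: xs).getD j "")) ∘ Nat.succ) = fun j => p (xs.getD j "") := by
        funext j; simp
      have hc2 : ((fun j => (a :: xs).getD j "") ∘ Nat.succ) = fun j => xs.getD j "" := by
        funext j; simp
      rw [hc1, hc2, List.filter_cons_of_neg (by simpa using hpa), ih]

lemma A_eq_filter (x : List String) :
    keep_ngrams_which_contains_others x = x.filter (goodB x) := by
  unfold keep_ngrams_which_contains_others
  have hfun : (fun (acc : List String) (i : Int) =>
      let cpt := cptA x i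
      if cpt = PySem.List.len x - 1 then acc ++ [PySem.List.pyGetD x i ""] else acc)
      = fun acc i => if (decide (cptA x i = PySem.List.len x - 1)) = true then acc ++ [PySem.List.pyGetD x i ""] else acc := by
    funext acc i; by_cases h : cptA x i = PySem.List.len x - 1 <;> simp [h]
  rw [hfun, PySem.List.foldl_append_if, PySem.List.pyRange_one]
  have h0 : ((PySem.List.len x : Int) - 0).toNat = x.length := by simp [PySem.List.len_eq]
  rw [h0, List.filter_map, List.map_map]
  have hcomp1 : ((fun (i : Int) => PySem.List.pyGetD x i "") ∘ (fun (k : Nat) => (0:Int) + ↑k)) = fun (k : Nat) => x.getD k "" := by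
    funext k; simp [PySem.List.pyGetD_natCast]
  have hcomp2 : ((fun (i : Int) => decide (cptA x i = PySem.List.len x - 1)) ∘ (fun (k : Nat) => (0:Int) + ↑k)) = fun (k : Nat) => decide (cptA x ↑k = PySem.List.len x - 1) := by
    funext k; simp
  rw [hcomp1, hcomp2]
  have hcong : (List.range x.length).filter (fun (k : Nat) => decide (cptA x (k : Int) = PySem.List.len x - 1))
      = (List.range x.length).filter (fun (k : Nat) => goodB x (x.getD k "")) := by
    apply List.filter_congr
    intro j hj
    rw [List.mem_range] at hj
    have hiff : (cptA x ↑j = PySem.List.len x - 1) ↔ goodB x (x.getD j "") = true := by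
      rw [cpt_iff x j hj]
      unfold goodB
      rw [List.all_eq_true]
    by_cases h : cptA x (j : Int) = PySem.List.len x - 1
    · rw [decide_eq_true h, hiff.mp h]
    · have hg : goodB x (x.getD j "") = false := by
        cases hgb : goodB x (x.getD j "") with
        | false => rfl
        | true => exact absurd (hiff.mpr hgb) h
      rw [decide_eq_false h, hg]
  rw [hcong, fmr]
  simp

lemma maxFold (l : List String) : ∀ (a : String), ∃ b,
    l.foldl maxStep (some a) = some b ∧
    b ∈ a :: l ∧ ∀ s ∈ a :: l, s.toList.length ≤ b.toList.length := by
  induction l with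
  | nil => intro a; exact ⟨a, rfl, by simp, by simp⟩
  | cons s l ih =>
    intro a
    by_cases h : PySem.Str.len a < PySem.Str.len s
    · obtain ⟨b, hb, hmem, hmax⟩ := ih s
      refine ⟨b, ?_, ?_, ?_⟩
      · rw [List.foldl_cons]
        show List.foldl _ (if PySem.Str.len a < PySem.Str.len s then some s else some a) l = some b
        rw [if_pos h]; exact hb
      · simp only [List.mem_cons] at hmem ⊢; tauto
      · intro t ht
        simp only [List.mem_cons] at ht
        have hlen : a.toList.length < s.toList.length := by
          simp only [PySem.Str.len_eq, Nat.cast_lt] at h; exact h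
        rcases ht with rfl | rfl | h'
        · have := hmax s (by simp); omega
        · exact hmax t (by simp)
        · exact hmax t (by simp [h'])
    · obtain ⟨b, hb, hmem, hmax⟩ := ih a
      refine ⟨b, ?_, ?_, ?_⟩
      · rw [List.foldl_cons]
        show List.foldl _ (if PySem.Str.len a < PySem.Str.len s then some s else some a) l = some b
        rw [if_neg h]; exact hb
      · simp only [List.mem_cons] at hmem ⊢; tauto
      · intro t ht
        simp only [List.mem_cons] at ht
        have hlen : s.toList.length ≤ a.toList.length := by
          simp only [PySem.Str.len_eq, not_lt, Nat.cast_le] at h; exact h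
        rcases ht with rfl | rfl | h'
        · exact hmax t (by simp)
        · have := hmax a (by simp); omega
        · exact hmax t (by simp [h'])

lemma keyEq (x : List String) (m u : String) (hm : m ∈ x)
    (hmax : ∀ s ∈ x, s.toList.length ≤ m.toList.length) (hu : u ∈ x)
    (hg : ∀ t ∈ x, PySem.Str.isIn t u = true) : u = m := by
  have h1 : m.toList <:+: u.toList := (PySem.Str.isIn_iff_infix m u).mp (hg m hm)
  have h2 := h1.length_le
  have h3 := hmax u hu
  exact (String.toList_inj.mp (h1.eq_of_length (le_antisymm h2 h3))).symm

lemma alt_eq_filter (x : List String) :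
    keep_ngrams_which_contains_others_alt x = x.filter (goodB x) := by
  unfold keep_ngrams_which_contains_others_alt
  rcases hd : PySem.List.dedup x with _ | ⟨d, ds⟩
  · have hx : x = [] := by
      cases hx' : x with
      | nil => rfl
      | cons a l =>
        exfalso
        have : a ∈ PySem.List.dedup x := (PySem.List.mem_dedup _ _).mpr (by rw [hx']; simp)
        rw [hd] at this
        simp at this
    subst hx
    rfl
  · obtain ⟨m, hm, hmem, hmax⟩ := maxFold ds d
    have hfold : (d :: ds).foldl maxStep none = some m := by rw [List.foldl_cons]; exact hm
    simp only [hfold]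
    have hmem_x : ∀ s, s ∈ x ↔ s ∈ d :: ds := fun s => by rw [← hd, PySem.List.mem_dedup]
    have hmx : m ∈ x := (hmem_x m).mpr hmem
    have hmax_x : ∀ s ∈ x, s.toList.length ≤ m.toList.length := fun s hs => hmax s ((hmem_x s).mp hs)
    by_cases h1 : (d :: ds).any (fun s => (PySem.Str.len s == PySem.Str.len m) && s != m) = true
    · rw [if_pos h1]
      symm
      rw [List.filter_eq_nil_iff]
      intro u hu hgu
      rw [goodB_iff] at hgu
      obtain ⟨s, hs, hsprop⟩ := List.any_eq_true.mp h1
      simp only [Bool.and_eq_true, beq_iff_eq, bne_iff_ne] at hsprop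
      have hum : u = m := keyEq x m u hmx hmax_x hu hgu
      have hsx : s ∈ x := (hmem_x s).mpr hs
      have hinf : s.toList <:+: u.toList := (PySem.Str.isIn_iff_infix s u).mp (hgu s hsx)
      have hlen : s.toList.length = m.toList.length := by
        have := hsprop.1
        simp only [PySem.Str.len_eq, Nat.cast_inj] at this
        exact this
      apply hsprop.2
      apply String.toList_inj.mp
      rw [hum] at hinf
      exact hinf.eq_of_length (by omega)
    · rw [if_neg h1]
      by_cases h2 : (d :: ds).any (fun t => !(PySem.Str.isIn t m)) = true
      · rw [if_pos h2]
        symm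
        rw [List.filter_eq_nil_iff]
        intro u hu hgu
        rw [goodB_iff] at hgu
        have hum : u = m := keyEq x m u hmx hmax_x hu hgu
        obtain ⟨t, ht, htprop⟩ := List.any_eq_true.mp h2
        rw [Bool.not_eq_eq_eq_not, Bool.not_true] at htprop
        have := hgu t ((hmem_x t).mpr ht)
        rw [hum] at this
        rw [htprop] at this
        exact Bool.false_ne_true this
      · rw [if_neg h2]
        apply List.filter_congr
        intro u hu
        have hall : ∀ t ∈ x, PySem.Str.isIn t m = true := by
          intro t ht
          have h2' := h2
          rw [List.any_eq_true] at h2'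
          push Not at h2'
          have := h2' t ((hmem_x t).mp ht)
          simpa using this
        by_cases hum : u = m
        · subst hum
          rw [beq_self_eq_true]
          exact ((goodB_iff x u).mpr hall).symm
        · have hbe : (u == m) = false := beq_eq_false_iff_ne.mpr hum
          rw [hbe]
          cases hgb : goodB x u with
          | false => rfl
          | true => exact absurd (keyEq x m u hmx hmax_x hu ((goodB_iff x u).mp hgb)) hum

-- ===== VERDICT (by name: the statement is the Claim_ definition above) =====
theorem keep_ngrams_which_contains_others_spec : Claim_equal_keep_ngrams_which_contains_others := by
  intro x _
  unfold Spec_keep_ngrams_which_contains_others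
  rw [A_eq_filter, alt_eq_filter]
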